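-- pv_equiv track=rewrite | github.com/Bhuvanesh2209/vision_audio_fusion | main.py | flatten_predictions
-- ===== SOURCE A (Python) =====
-- def flatten_predictions(y_true_dict, y_pred_dict):
--     all_labels = sorted({label for labels in y_true_dict.values() for label in labels} |
--                         {label for labels in y_pred_dict.values() for label in labels})
--
--     y_true_flat = []
--     y_pred_flat = []
--
--     for video_id in y_true_dict:
--         true_labels = set(y_true_dict[video_id])
--         pred_labels = set(y_pred_dict.get(video_id, []))
--
--         for label in all_labels:
--             y_true_flat.append(1 if label in true_labels else 0)
--             y_pred_flat.append(1 if label in pred_labels else 0)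
--
--     return y_true_flat, y_pred_flat, all_labels
-- ===== SOURCE B (Python) =====
-- def flatten_predictions(y_true_dict, y_pred_dict):
--     labels = set()
--     for lst in y_true_dict.values():
--         labels.update(lst)
--     for lst in y_pred_dict.values():
--         labels.update(lst)
--     all_labels = sorted(labels)
--     index_of = {label: i for i, label in enumerate(all_labels)}
--     n = len(all_labels)
--
--     y_true_flat = []
--     y_pred_flat = []
--     for video_id, true_labels in y_true_dict.items():
--         true_vec = [0] * n
--         pred_vec = [0] * n
--         for label in true_labels:
--             true_vec[index_of[label]] = 1
--         for label in y_pred_dict.get(video_id, []):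
--             pred_vec[index_of[label]] = 1
--         y_true_flat.extend(true_vec)
--         y_pred_flat.extend(pred_vec)
--     return y_true_flat, y_pred_flat, all_labels
-- ===== Notes on version B (the rewrite author's own statement) =====
-- stated objective: alternative
-- what changed: A scans the whole sorted label list per video testing set membership for each label; B builds a label-to-index table once, allocates zero vectors per video and marks only the indices of the labels actually present. Pre_ requires unique keys in the association lists, which every Python dict satisfies.
import Mathlib
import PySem

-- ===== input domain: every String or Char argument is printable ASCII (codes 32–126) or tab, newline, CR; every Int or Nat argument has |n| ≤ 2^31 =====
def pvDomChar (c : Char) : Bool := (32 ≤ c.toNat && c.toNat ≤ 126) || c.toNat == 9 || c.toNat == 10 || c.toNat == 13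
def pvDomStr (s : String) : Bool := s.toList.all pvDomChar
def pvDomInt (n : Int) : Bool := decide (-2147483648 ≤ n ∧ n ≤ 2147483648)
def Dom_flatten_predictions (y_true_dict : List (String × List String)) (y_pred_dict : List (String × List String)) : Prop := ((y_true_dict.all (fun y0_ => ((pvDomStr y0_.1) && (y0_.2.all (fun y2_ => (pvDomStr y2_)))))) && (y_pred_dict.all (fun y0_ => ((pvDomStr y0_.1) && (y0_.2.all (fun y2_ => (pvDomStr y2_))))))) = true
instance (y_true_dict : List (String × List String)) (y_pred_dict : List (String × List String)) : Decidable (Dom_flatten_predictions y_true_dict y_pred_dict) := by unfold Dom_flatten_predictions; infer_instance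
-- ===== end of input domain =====

-- B replaces A's per-video scan over all_labels (a membership test per label) by allocating
-- zero vectors and marking the indices of the labels actually present, via a label→index table.

-- ===== PORT A =====
def flatten_predictions (y_true_dict : List (String × List String)) (y_pred_dict : List (String × List String)) : List Int × List Int × List String :=
  let all_labels : List String :=
    PySem.List.sorted
      (PySem.Set.union (PySem.Set.ofList (y_true_dict.flatMap (fun kv => kv.2)))
                       (PySem.Set.ofList (y_pred_dict.flatMap (fun kv => kv.2))))
      (fun x => x) false
  let st :=
    y_true_dict.foldl (fun (acc : List Int × List Int) kv =>
      -- y_true_dict[video_id]: the key comes from the dict itself, so present under Pre_ (unique keys)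
      let true_labels := PySem.Set.ofList ((PySem.Dict.mk y_true_dict).getD kv.1 [])
      let pred_labels := PySem.Set.ofList ((PySem.Dict.mk y_pred_dict).getD kv.1 [])
      all_labels.foldl (fun (acc2 : List Int × List Int) label =>
        (acc2.1 ++ [if PySem.Set.contains true_labels label then (1:Int) else 0],
         acc2.2 ++ [if PySem.Set.contains pred_labels label then (1:Int) else 0])) acc)
      ([], [])
  (st.1, st.2, all_labels)

-- ===== PORT B =====
def flatten_predictions_alt (y_true_dict : List (String × List String)) (y_pred_dict : List (String × List String)) : List Int × List Int × List String :=
  let labels : PySem.Set String :=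
    y_pred_dict.foldl (fun s kv => PySem.Set.update s kv.2)
      (y_true_dict.foldl (fun s kv => PySem.Set.update s kv.2) PySem.Set.empty)
  let all_labels := PySem.List.sorted labels (fun x => x) false
  let index_of : PySem.Dict String Int :=
    (PySem.List.enumerate all_labels).foldl (fun d pr => d.insert pr.2 pr.1) PySem.Dict.empty
  let n := all_labels.length
  let st :=
    y_true_dict.foldl (fun (acc : List Int × List Int) kv =>
      -- index_of[label]: every present label is a key of index_of, so .getD never takes its default
      let true_vec := kv.2.foldl
          (fun v lab => PySem.List.pySetD v ((index_of.get? lab).getD 0) 1) (List.replicate n (0:Int))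
      let pred_vec := ((PySem.Dict.mk y_pred_dict).getD kv.1 []).foldl
          (fun v lab => PySem.List.pySetD v ((index_of.get? lab).getD 0) 1) (List.replicate n (0:Int))
      (acc.1 ++ true_vec, acc.2 ++ pred_vec)) ([], [])
  (st.1, st.2, all_labels)

-- ===== PRECONDITION & SPEC =====
-- Pre_ excludes association lists with duplicate keys: those do not represent a Python dict
-- (the dict literal collapses duplicates, so neither list port can match it) and A's value
-- there is an artefact of the representation.
def Pre_flatten_predictions (y_true_dict : List (String × List String)) (y_pred_dict : List (String × List String)) : Prop :=
  (y_true_dict.map Prod.fst).Nodup ∧ (y_pred_dict.map Prod.fst).Nodup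
instance (y_true_dict : List (String × List String)) (y_pred_dict : List (String × List String)) : Decidable (Pre_flatten_predictions y_true_dict y_pred_dict) := by unfold Pre_flatten_predictions; infer_instance

def pvWitness_flatten_predictions : (List (String × List String)) × (List (String × List String)) :=
  ([("v1", ["a", "b"]), ("v2", ["b"])], [("v1", ["b", "c"]), ("v3", ["a"])])

def Spec_flatten_predictions (y_true_dict : List (String × List String)) (y_pred_dict : List (String × List String)) (out : List Int × List Int × List String) : Prop := out = flatten_predictions_alt y_true_dict y_pred_dict
instance (y_true_dict : List (String × List String)) (y_pred_dict : List (String × List String)) (out : List Int × List Int × List String) : Decidable (Spec_flatten_predictions y_true_dict y_pred_dict out) := by unfold Spec_flatten_predictions; infer_instance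

-- ===== CLAIM (what is proved, stated in full; the proofs are below) =====
def Claim_equal_flatten_predictions : Prop := ∀ (y_true_dict : List (String × List String)) (y_pred_dict : List (String × List String)), Dom_flatten_predictions y_true_dict y_pred_dict → Pre_flatten_predictions y_true_dict y_pred_dict → Spec_flatten_predictions y_true_dict y_pred_dict (flatten_predictions y_true_dict y_pred_dict)

-- ===== LEMMAS AND PROOFS =====

theorem pv_mem_foldl_update (t : List (String × List String)) (s : PySem.Set String) (x : String) :
    x ∈ t.foldl (fun s kv => PySem.Set.update s kv.2) s ↔ x ∈ s ∨ x ∈ t.flatMap (fun kv => kv.2) := by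
  induction t generalizing s with
  | nil => simp
  | cons kv t ih => simp [ih, PySem.Set.mem_update]; tauto

theorem pv_nodup_foldl_update (t : List (String × List String)) (s : PySem.Set String) (hs : s.Nodup) :
    (t.foldl (fun s kv => PySem.Set.update s kv.2) s).Nodup := by
  induction t generalizing s with
  | nil => exact hs
  | cons kv t ih => exact ih _ (PySem.Set.nodup_update _ _ hs)

theorem pv_labels_eq (t p : List (String × List String)) :
    PySem.List.sorted
      (PySem.Set.union (PySem.Set.ofList (t.flatMap (fun kv => kv.2)))
                       (PySem.Set.ofList (p.flatMap (fun kv => kv.2)))) (fun x => x) false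
    = PySem.List.sorted
        (p.foldl (fun s kv => PySem.Set.update s kv.2)
          (t.foldl (fun s kv => PySem.Set.update s kv.2) PySem.Set.empty)) (fun x => x) false := by
  apply PySem.List.sorted_eq_sorted_of_perm
  · exact fun a b h => h
  · refine (List.perm_ext_iff_of_nodup
      (PySem.Set.nodup_union _ _ (PySem.Set.nodup_ofList _))
      (pv_nodup_foldl_update _ _ (pv_nodup_foldl_update _ _ List.nodup_nil))).mpr ?_
    intro x
    simp [PySem.Set.mem_union, PySem.Set.mem_ofList, pv_mem_foldl_update]

theorem pv_index_get? (L : List String) (hL : L.Nodup) (j : Nat) (hj : j < L.length) :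
    ((PySem.List.enumerate L).foldl (fun d pr => d.insert pr.2 pr.1)
      (PySem.Dict.empty : PySem.Dict String Int)).get? L[j] = some (j : Int) := by
  have hitems : ((PySem.List.enumerate L).foldl (fun d pr => d.insert pr.2 pr.1)
      (PySem.Dict.empty : PySem.Dict String Int)).items
      = (PySem.List.enumerate L).map (fun pr => (pr.2, pr.1)) := by
    have h := PySem.Dict.items_foldl_insert_fresh (PySem.List.enumerate L)
      (fun pr => pr.2) (fun pr => pr.1) (PySem.Dict.empty : PySem.Dict String Int)
      (by intro a _; simp [PySem.Dict.contains_empty])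
      (by rw [PySem.List.map_snd_enumerate]; exact hL)
    simpa [PySem.Dict.empty] using h
  have hkeys : ((PySem.List.enumerate L).foldl (fun d pr => d.insert pr.2 pr.1)
      (PySem.Dict.empty : PySem.Dict String Int)).keys = L := by
    simp only [PySem.Dict.keys, hitems, List.map_map]
    exact PySem.List.map_snd_enumerate L 0
  apply PySem.Dict.get?_of_mem_items
  · rw [hitems]
    apply List.mem_map.mpr
    refine ⟨((j : Int), L[j]), ?_, rfl⟩
    rw [PySem.List.mem_enumerate_iff]
    exact ⟨j, hj, by simp⟩
  · rw [hkeys]; exact hL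

theorem pv_mark_length (L : List String) (labs : List String) (v : List Int) :
    (labs.foldl (fun v lab => v.set (L.idxOf lab) 1) v).length = v.length := by
  induction labs generalizing v with
  | nil => rfl
  | cons a labs ih => simp [ih]

theorem pv_mark_getElem (L : List String) (hL : L.Nodup) (labs : List String)
    (hsub : ∀ l ∈ labs, l ∈ L) (v : List Int) (hv : v.length = L.length)
    (i : Nat) (hi : i < L.length) :
    (labs.foldl (fun v lab => v.set (L.idxOf lab) 1) v)[i]'(by rw [pv_mark_length, hv]; exact hi)
      = if L[i] ∈ labs then 1 else v[i]'(by rw [hv]; exact hi) := by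
  induction labs generalizing v with
  | nil => simp
  | cons a labs ih =>
    have haL : a ∈ L := hsub a (by simp)
    have hstep := ih (fun l hl => hsub l (by simp [hl])) (v.set (L.idxOf a) 1) (by simp [hv])
    simp only [List.foldl_cons] at *
    rw [hstep]
    have hidx : L.idxOf a < L.length := List.idxOf_lt_length_of_mem haL
    have hgetidx : L[L.idxOf a] = a := List.getElem_idxOf hidx
    have hiff : L[i] = a ↔ i = L.idxOf a := by
      constructor
      · intro h
        exact (List.Nodup.getElem_inj_iff hL).mp (by rw [h, hgetidx])
      · intro h; subst h; exact hgetidx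
    by_cases hmem : L[i] ∈ labs
    · simp [hmem]
    · simp only [hmem, if_false, List.mem_cons, or_false]
      rw [List.getElem_set]
      by_cases he : L[i] = a
      · simp [hiff.mp he]
      · have hne : ¬ (L.idxOf a = i) := fun hc => he (hiff.mpr hc.symm)
        simp [hne, he]

theorem pv_mark_eq_map (L : List String) (hL : L.Nodup) (labs : List String)
    (hsub : ∀ l ∈ labs, l ∈ L) :
    labs.foldl (fun v lab => v.set (L.idxOf lab) 1) (List.replicate L.length (0:Int))
      = L.map (fun l => if l ∈ labs then (1:Int) else 0) := by
  apply List.ext_getElem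
  · simp [pv_mark_length]
  · intro i hi hi'
    have hiL : i < L.length := by simpa using hi'
    rw [pv_mark_getElem L hL labs hsub _ (by simp) i hiL]
    simp

theorem pv_step_set (L : List String) (hL : L.Nodup) (lab : String) (hlab : lab ∈ L) (v : List Int) :
    PySem.List.pySetD v
      ((((PySem.List.enumerate L).foldl (fun d pr => d.insert pr.2 pr.1)
          (PySem.Dict.empty : PySem.Dict String Int)).get? lab).getD 0) 1
    = v.set (L.idxOf lab) 1 := by
  have hidx : L.idxOf lab < L.length := List.idxOf_lt_length_of_mem hlab
  have hget : L[L.idxOf lab] = lab := List.getElem_idxOf hidx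
  rw [show lab = L[L.idxOf lab] from hget.symm, pv_index_get? L hL _ hidx]
  simp [PySem.List.pySetD_natCast]

theorem pv_indicator (labs : List String) (label : String) :
    (if PySem.Set.contains (PySem.Set.ofList labs) label then (1:Int) else 0)
      = if label ∈ labs then (1:Int) else 0 := by
  by_cases h : label ∈ labs
  · simp [h]
  · simp [h]

theorem pv_getD_subset (p : List (String × List String)) (k : String) (l : String)
    (hl : l ∈ (PySem.Dict.mk p).getD k []) : l ∈ p.flatMap (fun kv => kv.2) := by
  rw [PySem.Dict.getD_eq_get?_getD] at hl
  cases hg : (PySem.Dict.mk p).get? k with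
  | none => rw [hg] at hl; simp at hl
  | some v =>
    rw [hg] at hl
    simp only [Option.getD_some] at hl
    have := PySem.Dict.mem_items_of_get?_eq_some _ hg
    simp only [List.mem_flatMap]
    exact ⟨(k, v), this, hl⟩

theorem pv_block_eq (t p : List (String × List String))
    (hpre : (t.map Prod.fst).Nodup)
    (L : List String) (hLnodup : L.Nodup)
    (hLmem : ∀ x, x ∈ L ↔ x ∈ t.flatMap (fun kv => kv.2) ∨ x ∈ p.flatMap (fun kv => kv.2))
    (acc : List Int × List Int) (kv : String × List String) (hkv : kv ∈ t) :
    L.foldl (fun (acc2 : List Int × List Int) label =>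
        (acc2.1 ++ [if PySem.Set.contains (PySem.Set.ofList ((PySem.Dict.mk t).getD kv.1 [])) label then (1:Int) else 0],
         acc2.2 ++ [if PySem.Set.contains (PySem.Set.ofList ((PySem.Dict.mk p).getD kv.1 [])) label then (1:Int) else 0])) acc
    = (acc.1 ++ kv.2.foldl
          (fun v lab => PySem.List.pySetD v
            ((((PySem.List.enumerate L).foldl (fun d pr => d.insert pr.2 pr.1)
                (PySem.Dict.empty : PySem.Dict String Int)).get? lab).getD 0) 1)
          (List.replicate L.length (0:Int)),
       acc.2 ++ ((PySem.Dict.mk p).getD kv.1 []).foldl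
          (fun v lab => PySem.List.pySetD v
            ((((PySem.List.enumerate L).foldl (fun d pr => d.insert pr.2 pr.1)
                (PySem.Dict.empty : PySem.Dict String Int)).get? lab).getD 0) 1)
          (List.replicate L.length (0:Int))) := by
  have htl : (PySem.Dict.mk t).getD kv.1 [] = kv.2 := by
    apply PySem.Dict.getD_of_mem_items
    · exact hkv
    · simpa using hpre
  have htsub : ∀ l ∈ kv.2, l ∈ L := by
    intro l hl
    exact (hLmem l).mpr (Or.inl (List.mem_flatMap.mpr ⟨kv, hkv, hl⟩))
  have hpsub : ∀ l ∈ (PySem.Dict.mk p).getD kv.1 [], l ∈ L := by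
    intro l hl
    exact (hLmem l).mpr (Or.inr (pv_getD_subset p kv.1 l hl))
  have hmark : ∀ (labs : List String), (∀ l ∈ labs, l ∈ L) →
      labs.foldl (fun v lab => PySem.List.pySetD v
          ((((PySem.List.enumerate L).foldl (fun d pr => d.insert pr.2 pr.1)
              (PySem.Dict.empty : PySem.Dict String Int)).get? lab).getD 0) 1)
        (List.replicate L.length (0:Int))
      = L.map (fun l => if l ∈ labs then (1:Int) else 0) := by
    intro labs hsub
    rw [PySem.List.foldl_congr_mem labs
      (fun v lab => PySem.List.pySetD v
          ((((PySem.List.enumerate L).foldl (fun d pr => d.insert pr.2 pr.1)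
              (PySem.Dict.empty : PySem.Dict String Int)).get? lab).getD 0) 1)
      (fun v lab => v.set (L.idxOf lab) 1)
      (List.replicate L.length (0:Int))
      (by intro v lab hlab; exact pv_step_set L hLnodup lab (hsub lab hlab) v)]
    exact pv_mark_eq_map L hLnodup labs hsub
  obtain ⟨a1, a2⟩ := acc
  rw [PySem.List.foldl_prod_mk
      (fun a label => a ++ [if PySem.Set.contains (PySem.Set.ofList ((PySem.Dict.mk t).getD kv.1 [])) label then (1:Int) else 0])
      (fun a label => a ++ [if PySem.Set.contains (PySem.Set.ofList ((PySem.Dict.mk p).getD kv.1 [])) label then (1:Int) else 0])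
      L a1 a2,
    PySem.List.foldl_append_singleton_eq_map, PySem.List.foldl_append_singleton_eq_map,
    hmark kv.2 htsub, hmark _ hpsub, htl]
  refine Prod.ext ?_ ?_ <;> simp only []
  · congr 1
    exact List.map_congr_left (fun l _ => pv_indicator kv.2 l)
  · congr 1
    exact List.map_congr_left (fun l _ => pv_indicator _ l)

-- ===== VERDICT (by name: the statement is the Claim_ definition above) =====
theorem flatten_predictions_spec : Claim_equal_flatten_predictions := by
  intro t p _ hpre
  unfold Spec_flatten_predictions
  simp only [flatten_predictions, flatten_predictions_alt]
  rw [← pv_labels_eq t p]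
  have hLnodup : (PySem.List.sorted
      (PySem.Set.union (PySem.Set.ofList (t.flatMap (fun kv => kv.2)))
                       (PySem.Set.ofList (p.flatMap (fun kv => kv.2)))) (fun x => x) false).Nodup := by
    have hperm := PySem.List.sorted_perm
      (PySem.Set.union (PySem.Set.ofList (t.flatMap (fun kv => kv.2)))
                       (PySem.Set.ofList (p.flatMap (fun kv => kv.2)))) (fun x => x) false
    exact hperm.nodup_iff.mpr (PySem.Set.nodup_union _ _ (PySem.Set.nodup_ofList _))
  have hLmem : ∀ x, x ∈ (PySem.List.sorted
      (PySem.Set.union (PySem.Set.ofList (t.flatMap (fun kv => kv.2)))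
                       (PySem.Set.ofList (p.flatMap (fun kv => kv.2)))) (fun x => x) false)
      ↔ x ∈ t.flatMap (fun kv => kv.2) ∨ x ∈ p.flatMap (fun kv => kv.2) := by
    intro x
    rw [PySem.List.mem_sorted, PySem.Set.mem_union]
    simp [PySem.Set.mem_ofList]
  rw [PySem.List.foldl_congr_mem t _ _ (([] : List Int), ([] : List Int))
    (by intro acc kv hkv; exact pv_block_eq t p hpre.1 _ hLnodup hLmem acc kv hkv)]
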